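-- pv_equiv track=rewrite | github.com/bcgov/foi-docreviewer | api/reviewer_api/services/documentservice.py | __updatecoversionstatus
-- ===== SOURCE A (Python) =====
-- def __updatecoversionstatus(conversions, record):
--     for conversion in conversions:
--         if record["documentmasterid"] == conversion["documentmasterid"]:
--             record["conversionstatus"] = conversion["status"]
--             record["outputdocumentmasterid"] = conversion["outputdocumentmasterid"]
--             record["filename"] = conversion["filename"]
--             record["trigger"] = conversion["trigger"]
--     return record
-- ===== SOURCE B (Python) =====
-- def __updatecoversionstatus(conversions, record):
--     match = next((c for c in reversed(conversions)
--                   if c["documentmasterid"] == record["documentmasterid"]), None)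
--     if match is not None:
--         record["conversionstatus"] = match["status"]
--         record["outputdocumentmasterid"] = match["outputdocumentmasterid"]
--         record["filename"] = match["filename"]
--         record["trigger"] = match["trigger"]
--     return record
-- ===== Notes on version B (the rewrite author's own statement) =====
-- stated objective: simpler
-- what changed: Instead of scanning all conversions and overwriting the record on every match, B selects the last matching conversion once (reversed scan with next) and applies its four fields to the record in a single block.
import Mathlib
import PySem

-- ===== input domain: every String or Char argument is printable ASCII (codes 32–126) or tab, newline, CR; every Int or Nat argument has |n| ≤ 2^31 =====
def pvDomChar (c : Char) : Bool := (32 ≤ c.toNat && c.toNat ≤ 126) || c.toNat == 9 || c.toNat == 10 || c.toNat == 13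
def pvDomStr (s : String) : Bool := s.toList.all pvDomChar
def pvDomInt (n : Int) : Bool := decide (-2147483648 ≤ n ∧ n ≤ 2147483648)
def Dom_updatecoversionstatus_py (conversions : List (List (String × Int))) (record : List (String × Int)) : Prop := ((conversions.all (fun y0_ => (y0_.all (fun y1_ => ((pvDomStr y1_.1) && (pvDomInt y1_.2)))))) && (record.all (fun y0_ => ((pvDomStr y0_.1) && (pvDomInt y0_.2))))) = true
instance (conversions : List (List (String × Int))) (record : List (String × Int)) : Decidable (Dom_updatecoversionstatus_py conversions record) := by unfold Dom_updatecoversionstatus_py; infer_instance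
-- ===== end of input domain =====

-- B replaces A's scan-and-repeatedly-overwrite loop by 'select the last matching conversion, then apply its
-- four fields once' (objective: simpler). Both A and B mutate `record` in place in the same way; the
-- equivalence proved here is about the returned dict (which is that same mutated `record` in both).

-- ===== PORT A =====
-- literal transliteration of A's loop: fold over conversions, overwriting the four record fields on every match
def updatecoversionstatus_py (conversions : List (List (String × Int))) (record : List (String × Int)) : List (String × Int) :=
  (conversions.foldl
    (fun rec conversion =>
      match rec.get? "documentmasterid", (PySem.Dict.mk conversion).get? "documentmasterid" with
      | some rid, some cid =>
        if rid == cid then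
          match (PySem.Dict.mk conversion).get? "status",
                (PySem.Dict.mk conversion).get? "outputdocumentmasterid",
                (PySem.Dict.mk conversion).get? "filename",
                (PySem.Dict.mk conversion).get? "trigger" with
          | some s, some o, some f, some t =>
            (((rec.insert "conversionstatus" s).insert "outputdocumentmasterid" o).insert "filename" f).insert "trigger" t
          | _, _, _, _ => rec   -- Python raises KeyError here; excluded by Pre_
        else rec
      | _, _ => rec             -- Python raises KeyError here; excluded by Pre_
      ) (PySem.Dict.mk record)).items

-- ===== PORT B =====
-- literal transliteration of B: find the last matching conversion (scan of the reversed list), apply once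
def updatecoversionstatus_py_alt (conversions : List (List (String × Int))) (record : List (String × Int)) : List (String × Int) :=
  match (PySem.Dict.mk record).get? "documentmasterid" with
  | none => record              -- with conversions ≠ [] Python raises KeyError here; excluded by Pre_
  | some rid =>
    match conversions.reverse.find? (fun c => (PySem.Dict.mk c).get? "documentmasterid" == some rid) with
    | none => record
    | some c =>
      -- Source B reads the four fields of the selected conversion one after another
      match (PySem.Dict.mk c).get? "status" with
      | none => record          -- Python raises KeyError here; excluded by Pre_
      | some s =>
        match (PySem.Dict.mk c).get? "outputdocumentmasterid" with
        | none => record        -- Python raises KeyError here; excluded by Pre_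
        | some o =>
          match (PySem.Dict.mk c).get? "filename" with
          | none => record      -- Python raises KeyError here; excluded by Pre_
          | some f =>
            match (PySem.Dict.mk c).get? "trigger" with
            | none => record    -- Python raises KeyError here; excluded by Pre_
            | some t =>
              (((((PySem.Dict.mk record).insert "conversionstatus" s).insert "outputdocumentmasterid" o).insert "filename" f).insert "trigger" t).items

-- ===== PRECONDITION & SPEC =====
-- Pre_ is exactly where Python A returns without a KeyError: with a non-empty conversion list, the record
-- must carry "documentmasterid", every conversion must carry "documentmasterid", and every MATCHING
-- conversion must carry the four copied keys.
def Pre_updatecoversionstatus_py (conversions : List (List (String × Int))) (record : List (String × Int)) : Prop :=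
  conversions = [] ∨
  (((PySem.Dict.mk record).get? "documentmasterid").isSome = true ∧
   ∀ c ∈ conversions,
     ((PySem.Dict.mk c).get? "documentmasterid").isSome = true ∧
     ((PySem.Dict.mk c).get? "documentmasterid" = (PySem.Dict.mk record).get? "documentmasterid" →
       ((PySem.Dict.mk c).get? "status").isSome = true ∧
       ((PySem.Dict.mk c).get? "outputdocumentmasterid").isSome = true ∧
       ((PySem.Dict.mk c).get? "filename").isSome = true ∧
       ((PySem.Dict.mk c).get? "trigger").isSome = true))
instance (conversions : List (List (String × Int))) (record : List (String × Int)) : Decidable (Pre_updatecoversionstatus_py conversions record) := by unfold Pre_updatecoversionstatus_py; infer_instance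

def pvWitness_updatecoversionstatus_py : (List (List (String × Int))) × (List (String × Int)) :=
  ([[("documentmasterid", 1), ("status", 2), ("outputdocumentmasterid", 3), ("filename", 4), ("trigger", 5)]],
   [("documentmasterid", 1)])

def Spec_updatecoversionstatus_py (conversions : List (List (String × Int))) (record : List (String × Int)) (out : List (String × Int)) : Prop := out = updatecoversionstatus_py_alt conversions record
instance (conversions : List (List (String × Int))) (record : List (String × Int)) (out : List (String × Int)) : Decidable (Spec_updatecoversionstatus_py conversions record out) := by unfold Spec_updatecoversionstatus_py; infer_instance

-- ===== CLAIM (what is proved, stated in full; the proofs are below) =====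
def Claim_equal_updatecoversionstatus_py : Prop := ∀ (conversions : List (List (String × Int))) (record : List (String × Int)), Dom_updatecoversionstatus_py conversions record → Pre_updatecoversionstatus_py conversions record → Spec_updatecoversionstatus_py conversions record (updatecoversionstatus_py conversions record)

-- ===== LEMMAS AND PROOFS =====

-- A's loop body, named for the proofs (definitionally the lambda inside updatecoversionstatus_py)
def stepA (rec : PySem.Dict String Int) (conversion : List (String × Int)) : PySem.Dict String Int :=
  match rec.get? "documentmasterid", (PySem.Dict.mk conversion).get? "documentmasterid" with
  | some rid, some cid =>
    if rid == cid then
      match (PySem.Dict.mk conversion).get? "status",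
            (PySem.Dict.mk conversion).get? "outputdocumentmasterid",
            (PySem.Dict.mk conversion).get? "filename",
            (PySem.Dict.mk conversion).get? "trigger" with
      | some s, some o, some f, some t =>
        (((rec.insert "conversionstatus" s).insert "outputdocumentmasterid" o).insert "filename" f).insert "trigger" t
      | _, _, _, _ => rec
    else rec
  | _, _ => rec

def ins4 (d : PySem.Dict String Int) (s o f t : Int) : PySem.Dict String Int :=
  (((d.insert "conversionstatus" s).insert "outputdocumentmasterid" o).insert "filename" f).insert "trigger" t

def applyC (c : List (String × Int)) (rec : PySem.Dict String Int) : PySem.Dict String Int :=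
  match (PySem.Dict.mk c).get? "status",
        (PySem.Dict.mk c).get? "outputdocumentmasterid",
        (PySem.Dict.mk c).get? "filename",
        (PySem.Dict.mk c).get? "trigger" with
  | some s, some o, some f, some t => ins4 rec s o f t
  | _, _, _, _ => rec

lemma A_eq_foldl (conversions : List (List (String × Int))) (record : List (String × Int)) :
    updatecoversionstatus_py conversions record = (conversions.foldl stepA (PySem.Dict.mk record)).items := rfl

-- two in-place inserts at distinct keys commute when the first key is already present
lemma dict_insert_comm (d : PySem.Dict String Int) (k k' : String) (w v' : Int)
    (hd : d.contains k = true) (hne : k ≠ k') :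
    (d.insert k' v').insert k w = (d.insert k w).insert k' v' := by
  have hk1 : (d.insert k' v').contains k = true := by
    rw [PySem.Dict.contains_insert]; simp [hd]
  by_cases h' : d.contains k' = true
  · have hk2 : (d.insert k w).contains k' = true := by
      rw [PySem.Dict.contains_insert]; simp [h']
    apply PySem.Dict.ext
    rw [PySem.Dict.items_insert_of_contains _ _ hk1,
        PySem.Dict.items_insert_of_contains _ _ h',
        PySem.Dict.items_insert_of_contains _ _ hk2,
        PySem.Dict.items_insert_of_contains _ _ hd,
        List.map_map, List.map_map]
    apply List.map_congr_left
    intro p _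
    by_cases h1 : p.1 = k <;> by_cases h2 : p.1 = k' <;>
      simp_all [Function.comp, beq_iff_eq]
  · have h'' : d.contains k' = false := by simpa using h'
    have h'2 : (d.insert k w).contains k' = false := by
      rw [PySem.Dict.contains_insert]
      simp [h'']
      intro h; exact absurd h.symm hne
    apply PySem.Dict.ext
    rw [PySem.Dict.items_insert_of_contains _ _ hk1,
        PySem.Dict.items_insert_of_not_contains _ _ h'',
        PySem.Dict.items_insert_of_not_contains _ _ h'2,
        PySem.Dict.items_insert_of_contains _ _ hd,
        List.map_append]
    simp [beq_iff_eq, Ne.symm hne]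

lemma ins4_absorb (d : PySem.Dict String Int) (s1 o1 f1 t1 s2 o2 f2 t2 : Int) :
    ins4 (ins4 d s1 o1 f1 t1) s2 o2 f2 t2 = ins4 d s2 o2 f2 t2 := by
  unfold ins4
  rw [dict_insert_comm (((d.insert "conversionstatus" s1).insert "outputdocumentmasterid" o1).insert "filename" f1) "conversionstatus" "trigger" s2 t1 (by simp [PySem.Dict.contains_insert, PySem.Dict.contains_insert_self]) (by decide),
      dict_insert_comm ((d.insert "conversionstatus" s1).insert "outputdocumentmasterid" o1) "conversionstatus" "filename" s2 f1 (by simp [PySem.Dict.contains_insert, PySem.Dict.contains_insert_self]) (by decide),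
      dict_insert_comm (d.insert "conversionstatus" s1) "conversionstatus" "outputdocumentmasterid" s2 o1 (by simp [PySem.Dict.contains_insert, PySem.Dict.contains_insert_self]) (by decide),
      PySem.Dict.insert_insert_self d "conversionstatus" s1 s2,
      dict_insert_comm (((d.insert "conversionstatus" s2).insert "outputdocumentmasterid" o1).insert "filename" f1) "outputdocumentmasterid" "trigger" o2 t1 (by simp [PySem.Dict.contains_insert, PySem.Dict.contains_insert_self]) (by decide),
      dict_insert_comm ((d.insert "conversionstatus" s2).insert "outputdocumentmasterid" o1) "outputdocumentmasterid" "filename" o2 f1 (by simp [PySem.Dict.contains_insert, PySem.Dict.contains_insert_self]) (by decide),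
      PySem.Dict.insert_insert_self (d.insert "conversionstatus" s2) "outputdocumentmasterid" o1 o2,
      dict_insert_comm (((d.insert "conversionstatus" s2).insert "outputdocumentmasterid" o2).insert "filename" f1) "filename" "trigger" f2 t1 (by simp [PySem.Dict.contains_insert, PySem.Dict.contains_insert_self]) (by decide),
      PySem.Dict.insert_insert_self ((d.insert "conversionstatus" s2).insert "outputdocumentmasterid" o2) "filename" f1 f2,
      PySem.Dict.insert_insert_self (((d.insert "conversionstatus" s2).insert "outputdocumentmasterid" o2).insert "filename" f2) "trigger" t1 t2]
lemma get?_ins4_dmi (d : PySem.Dict String Int) (s o f t : Int) :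
    (ins4 d s o f t).get? "documentmasterid" = d.get? "documentmasterid" := by
  unfold ins4
  rw [PySem.Dict.get?_insert_of_ne _ _ (by decide), PySem.Dict.get?_insert_of_ne _ _ (by decide),
      PySem.Dict.get?_insert_of_ne _ _ (by decide), PySem.Dict.get?_insert_of_ne _ _ (by decide)]

lemma applyC_eq (c : List (String × Int)) (rec : PySem.Dict String Int) (s o f t : Int)
    (hs : (PySem.Dict.mk c).get? "status" = some s)
    (ho : (PySem.Dict.mk c).get? "outputdocumentmasterid" = some o)
    (hf : (PySem.Dict.mk c).get? "filename" = some f)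
    (ht : (PySem.Dict.mk c).get? "trigger" = some t) :
    applyC c rec = ins4 rec s o f t := by
  simp only [applyC, hs, ho, hf, ht]

lemma stepA_eq (rec : PySem.Dict String Int) (c : List (String × Int)) (rid : Int)
    (hrec : rec.get? "documentmasterid" = some rid) :
    stepA rec c =
      if ((PySem.Dict.mk c).get? "documentmasterid" == some rid) then applyC c rec else rec := by
  unfold stepA applyC
  cases h : (PySem.Dict.mk c).get? "documentmasterid" with
  | none => simp [hrec]
  | some cid =>
    simp only [hrec]
    by_cases hq : rid = cid
    · subst hq; simp [ins4]
    · simp [hq, Ne.symm hq]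

lemma step_get?_dmi (rec : PySem.Dict String Int) (c : List (String × Int)) :
    (stepA rec c).get? "documentmasterid" = rec.get? "documentmasterid" := by
  unfold stepA
  cases h1 : rec.get? "documentmasterid" with
  | none => cases h2 : (PySem.Dict.mk c).get? "documentmasterid" <;>
      (simp [h1])
  | some rid =>
    cases h2 : (PySem.Dict.mk c).get? "documentmasterid" with
    | none => simp [h1]
    | some cid =>
      by_cases hq : (rid == cid) = true
      · cases hs : (PySem.Dict.mk c).get? "status" <;>
        cases ho : (PySem.Dict.mk c).get? "outputdocumentmasterid" <;>
        cases hf : (PySem.Dict.mk c).get? "filename" <;>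
        cases ht : (PySem.Dict.mk c).get? "trigger" <;>
          simp only [hq, if_true, hs, ho, hf, ht] <;>
          first
            | exact h1
            | (exact (get?_ins4_dmi rec _ _ _ _).trans h1)
      · simp only [hq]; exact h1

lemma foldA_eq (rid : Int) (cs : List (List (String × Int))) (rec : PySem.Dict String Int)
    (hrec : rec.get? "documentmasterid" = some rid)
    (hcs : ∀ c ∈ cs, (PySem.Dict.mk c).get? "documentmasterid" = some rid →
      ((PySem.Dict.mk c).get? "status").isSome = true ∧
      ((PySem.Dict.mk c).get? "outputdocumentmasterid").isSome = true ∧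
      ((PySem.Dict.mk c).get? "filename").isSome = true ∧
      ((PySem.Dict.mk c).get? "trigger").isSome = true) :
    cs.foldl stepA rec =
      match cs.reverse.find? (fun c => (PySem.Dict.mk c).get? "documentmasterid" == some rid) with
      | none => rec
      | some c => applyC c rec := by
  induction cs generalizing rec with
  | nil => simp
  | cons c cs ih =>
    have hrec' : (stepA rec c).get? "documentmasterid" = some rid := by
      rw [step_get?_dmi]; exact hrec
    have hcs' : ∀ c' ∈ cs, (PySem.Dict.mk c').get? "documentmasterid" = some rid →
        ((PySem.Dict.mk c').get? "status").isSome = true ∧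
        ((PySem.Dict.mk c').get? "outputdocumentmasterid").isSome = true ∧
        ((PySem.Dict.mk c').get? "filename").isSome = true ∧
        ((PySem.Dict.mk c').get? "trigger").isSome = true :=
      fun c' h => hcs c' (List.mem_cons_of_mem _ h)
    rw [List.foldl_cons, List.reverse_cons, List.find?_append, ih (stepA rec c) hrec' hcs']
    cases hfind : cs.reverse.find? (fun c => (PySem.Dict.mk c).get? "documentmasterid" == some rid) with
    | some c2 =>
      simp only [Option.some_or]
      show applyC c2 (stepA rec c) = applyC c2 rec
      -- a later conversion c2 matches: applying c first and then c2 equals applying c2 alone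
      have hc2mem : c2 ∈ cs := List.mem_reverse.mp (List.mem_of_find?_eq_some hfind)
      have hc2match : (PySem.Dict.mk c2).get? "documentmasterid" = some rid := by
        have := List.find?_some hfind
        simpa using this
      obtain ⟨hs2, ho2, hf2, ht2⟩ := hcs' c2 hc2mem hc2match
      obtain ⟨s2, hs2⟩ := Option.isSome_iff_exists.mp hs2
      obtain ⟨o2, ho2⟩ := Option.isSome_iff_exists.mp ho2
      obtain ⟨f2, hf2⟩ := Option.isSome_iff_exists.mp hf2
      obtain ⟨t2, ht2⟩ := Option.isSome_iff_exists.mp ht2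
      rw [stepA_eq rec c rid hrec]
      by_cases hm : ((PySem.Dict.mk c).get? "documentmasterid" == some rid) = true
      · obtain ⟨hs, ho, hf, ht⟩ := hcs c (List.mem_cons_self) (by simpa using hm)
        obtain ⟨s, hs⟩ := Option.isSome_iff_exists.mp hs
        obtain ⟨o, ho⟩ := Option.isSome_iff_exists.mp ho
        obtain ⟨f, hf⟩ := Option.isSome_iff_exists.mp hf
        obtain ⟨t, ht⟩ := Option.isSome_iff_exists.mp ht
        rw [if_pos hm, applyC_eq c rec s o f t hs ho hf ht,
            applyC_eq c2 _ s2 o2 f2 t2 hs2 ho2 hf2 ht2,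
            applyC_eq c2 rec s2 o2 f2 t2 hs2 ho2 hf2 ht2, ins4_absorb]
      · rw [if_neg hm]
    | none =>
      simp only [Option.none_or]
      show stepA rec c =
        match List.find? (fun c => (PySem.Dict.mk c).get? "documentmasterid" == some rid) [c] with
        | none => rec
        | some c' => applyC c' rec
      rw [stepA_eq rec c rid hrec]
      cases hm : ((PySem.Dict.mk c).get? "documentmasterid" == some rid) with
      | true => simp [hm]
      | false => simp [hm]

lemma B_eq (conversions : List (List (String × Int))) (record : List (String × Int)) (rid : Int)
    (hrid : (PySem.Dict.mk record).get? "documentmasterid" = some rid) :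
    updatecoversionstatus_py_alt conversions record =
      match conversions.reverse.find? (fun c => (PySem.Dict.mk c).get? "documentmasterid" == some rid) with
      | none => record
      | some c =>
        match (PySem.Dict.mk c).get? "status" with
        | none => record
        | some s =>
          match (PySem.Dict.mk c).get? "outputdocumentmasterid" with
          | none => record
          | some o =>
            match (PySem.Dict.mk c).get? "filename" with
            | none => record
            | some f =>
              match (PySem.Dict.mk c).get? "trigger" with
              | none => record
              | some t => (ins4 (PySem.Dict.mk record) s o f t).items := by
  unfold updatecoversionstatus_py_alt ins4
  rw [hrid]

-- ===== VERDICT (by name: the statement is the Claim_ definition above) =====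
theorem updatecoversionstatus_py_spec : Claim_equal_updatecoversionstatus_py := by
  intro conversions record _ hpre
  unfold Spec_updatecoversionstatus_py
  rcases hpre with hnil | ⟨hrid, hcs⟩
  · subst hnil
    cases h : (PySem.Dict.mk record).get? "documentmasterid" <;>
      simp [updatecoversionstatus_py, updatecoversionstatus_py_alt, h]
  · obtain ⟨rid, hrid⟩ := Option.isSome_iff_exists.mp hrid
    have hcs' : ∀ c ∈ conversions, (PySem.Dict.mk c).get? "documentmasterid" = some rid →
        ((PySem.Dict.mk c).get? "status").isSome = true ∧
        ((PySem.Dict.mk c).get? "outputdocumentmasterid").isSome = true ∧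
        ((PySem.Dict.mk c).get? "filename").isSome = true ∧
        ((PySem.Dict.mk c).get? "trigger").isSome = true := by
      intro c hc hmatch
      exact (hcs c hc).2 (by rw [hmatch, hrid])
    rw [A_eq_foldl, foldA_eq rid conversions (PySem.Dict.mk record) hrid hcs',
        B_eq conversions record rid hrid]
    cases hfind : conversions.reverse.find? (fun c => (PySem.Dict.mk c).get? "documentmasterid" == some rid) with
    | none => rfl
    | some c =>
      have hcmem : c ∈ conversions := List.mem_reverse.mp (List.mem_of_find?_eq_some hfind)
      have hcmatch : (PySem.Dict.mk c).get? "documentmasterid" = some rid := by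
        have := List.find?_some hfind
        simpa using this
      obtain ⟨hs, ho, hf, ht⟩ := hcs' c hcmem hcmatch
      obtain ⟨s, hs⟩ := Option.isSome_iff_exists.mp hs
      obtain ⟨o, ho⟩ := Option.isSome_iff_exists.mp ho
      obtain ⟨f, hf⟩ := Option.isSome_iff_exists.mp hf
      obtain ⟨t, ht⟩ := Option.isSome_iff_exists.mp ht
      show (applyC c (PySem.Dict.mk record)).items =
        match (PySem.Dict.mk c).get? "status" with
        | none => record
        | some s =>
          match (PySem.Dict.mk c).get? "outputdocumentmasterid" with
          | none => record
          | some o =>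
            match (PySem.Dict.mk c).get? "filename" with
            | none => record
            | some f =>
              match (PySem.Dict.mk c).get? "trigger" with
              | none => record
              | some t => (ins4 (PySem.Dict.mk record) s o f t).items
      rw [applyC_eq c _ s o f t hs ho hf ht]
      simp only [hs, ho, hf, ht]
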